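-- pv_equiv track=rewrite | github.com/patrickying/dsabig2_project | student/苑博/苑博_team-yuan-jiang.py | liansantong2inmyHand
-- ===== SOURCE A (Python) =====
-- def liansantong2inmyHand(alist, length):
--     l = length//5
--     temp = []
--     aset = list(set(alist))
--     aset.sort(key = alist.index)
--     for item in aset:
--         if alist.count(item) == 3:
--             temp.append(item)
--             temp.append(item)
--             temp.append(item)
--     if len(temp)/3<l:
--         return []
--     else:
--         output = temp[:3*l]
--         temp2 = []
--         for item in alist:
--             temp2.append(item)
--         for item in output:
--             temp2.remove(item)
--         aset = list(set(temp2))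
--         aset.sort(key = temp2.index)
--         for item in aset:
--             if temp2.count(item)>=2:
--                 output.append(item)
--                 output.append(item)
--             if len(output) == length:
--                 return output
--     return []
-- ===== SOURCE B (Python) =====
-- def liansantong2inmyHand(alist, length):
--     l = length // 5
--     # group by repeated partition on the head: (value, multiplicity) in first-appearance order
--     gs = []
--     rest = alist
--     while rest:
--         x = rest[0]
--         nxt = [y for y in rest if y != x]
--         gs.append((x, len(rest) - len(nxt)))
--         rest = nxt
--     triples = [x for x, c in gs if c == 3]
--     if len(triples) < l:
--         return []
--     chosen = triples[:l]
--     out = []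
--     for t in chosen:
--         out += [t, t, t]
--     for x, c in gs:
--         if x in chosen:
--             continue
--         if c >= 2:
--             out = out + [x, x]
--         if len(out) == length:
--             return out
--     return []
-- ===== Notes on version B (the rewrite author's own statement) =====
-- stated objective: alternative
-- what changed: B replaces A's set()+sort(key=alist.index)+repeated count/index and element-by-element remove with a repeated head-partition: it peels off the head value's whole equivalence class at each step to get (value,count) groups in first-appearance order, then emits the triples and pads with pairs in one scan over those groups.
import Mathlib
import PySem

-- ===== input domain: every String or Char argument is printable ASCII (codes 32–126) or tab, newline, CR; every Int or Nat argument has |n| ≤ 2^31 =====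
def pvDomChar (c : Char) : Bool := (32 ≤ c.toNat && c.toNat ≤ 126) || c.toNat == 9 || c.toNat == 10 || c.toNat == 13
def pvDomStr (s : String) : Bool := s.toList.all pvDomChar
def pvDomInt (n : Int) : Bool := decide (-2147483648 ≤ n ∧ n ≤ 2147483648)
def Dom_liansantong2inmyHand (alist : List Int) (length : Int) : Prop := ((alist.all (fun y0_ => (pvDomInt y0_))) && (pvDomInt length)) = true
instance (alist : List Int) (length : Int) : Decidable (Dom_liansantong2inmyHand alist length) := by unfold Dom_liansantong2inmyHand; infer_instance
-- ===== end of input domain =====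

-- B replaces A's set()+sort(key=index)+count/remove rescans by repeated head-partition into
-- (value, count) groups in first-appearance order, then one scan over the groups (alternative algorithm).


-- ===== PORT A =====
-- `temp2.remove(item)`: every removed item occurs three times in `temp2` when reached,
-- so Python's remove never raises and the `.getD t` fallback is unreachable.
def pvRemoveA (t : List Int) (x : Int) : List Int := (PySem.List.remove? t x).getD t

-- the second `for item in aset: … if len(output) == length: return output` loop of A
-- (returns `none` where the Python loop falls through to the final `return []`)
def pvLoopA (aset : List Int) (temp2 : List Int) (output : List Int) (length : Int) :
    Option (List Int) :=
  match aset with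
  | [] => none
  | x :: rest =>
    let output' := if 2 ≤ PySem.List.count temp2 x then output ++ [x, x] else output
    if (output'.length : Int) = length then some output'
    else pvLoopA rest temp2 output' length

def liansantong2inmyHand (alist : List Int) (length : Int) : List Int :=
  let l := PySem.Int.floordiv length 5
  let aset := PySem.List.sorted (PySem.Set.ofList alist)
      (fun x => (PySem.List.index? alist x).getD 0)
  let temp := aset.foldl
      (fun acc item => if PySem.List.count alist item = 3 then acc ++ [item, item, item] else acc) []
  -- `len(temp)/3 < l`: temp's length is a multiple of 3 (it is built in triples),
  -- so Python's exact float comparison coincides with the integer one below.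
  if (temp.length : Int) < 3 * l then []
  else
    let output := PySem.List.slice temp none (some (3 * l))
    let temp2 := alist.foldl (fun acc item => acc ++ [item]) []
    let temp2' := output.foldl pvRemoveA temp2
    let aset2 := PySem.List.sorted (PySem.Set.ofList temp2')
        (fun x => (PySem.List.index? temp2' x).getD 0)
    (pvLoopA aset2 temp2' output length).getD []

-- ===== PORT B =====
-- the `while rest:` head-partition loop of B: peel off the head value's whole class,
-- record (value, multiplicity), continue on what is left
def pvGroups (lst : List Int) : List (Int × Int) :=
  match lst with
  | [] => []
  | x :: t =>
    let nxt := (x :: t).filter (fun y => !(y == x))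
    (x, ((x :: t).length : Int) - (nxt.length : Int)) :: pvGroups nxt
termination_by lst.length
decreasing_by
  simp only [List.filter_cons, beq_self_eq_true, Bool.not_true, List.length_cons]
  exact Nat.lt_succ_of_le (List.length_filter_le _ _)

-- the `for x, c in gs: …` padding loop of B (the trailing `return []` included)
def pvPad (gs : List (Int × Int)) (chosen : List Int) (out : List Int) (length : Int) :
    List Int :=
  match gs with
  | [] => []
  | (x, c) :: rest =>
    if chosen.contains x then pvPad rest chosen out length
    else
      let out' := if 2 ≤ c then out ++ [x, x] else out
      if (out'.length : Int) = length then out' else pvPad rest chosen out' length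

def liansantong2inmyHand_alt (alist : List Int) (length : Int) : List Int :=
  let l := PySem.Int.floordiv length 5
  let gs := pvGroups alist
  let triples := (gs.filter (fun p => p.2 == 3)).map (·.1)
  if (triples.length : Int) < l then []
  else
    let chosen := PySem.List.slice triples none (some l)
    let out := chosen.foldl (fun acc t => acc ++ [t, t, t]) []
    pvPad gs chosen out length

-- ===== PRECONDITION & SPEC =====
def Spec_liansantong2inmyHand (alist : List Int) (length : Int) (out : List Int) : Prop := out = liansantong2inmyHand_alt alist length
instance (alist : List Int) (length : Int) (out : List Int) : Decidable (Spec_liansantong2inmyHand alist length out) := by unfold Spec_liansantong2inmyHand; infer_instance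

-- ===== CLAIM (what is proved, stated in full; the proofs are below) =====
def Claim_equal_liansantong2inmyHand : Prop := ∀ (alist : List Int) (length : Int), Dom_liansantong2inmyHand alist length → Spec_liansantong2inmyHand alist length (liansantong2inmyHand alist length)

-- ===== LEMMAS AND PROOFS =====

theorem pv_ofList_append_singleton (xs : List Int) (y : Int) :
    PySem.Set.ofList (xs ++ [y]) = PySem.Set.add (PySem.Set.ofList xs) y := by
  simp [PySem.Set.ofList, List.foldl_append]

theorem pv_idx_lt_length {xs : List Int} {a : Int} (h : a ∈ xs) :
    ((PySem.List.index? xs a).getD 0 : Nat) < xs.length := by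
  have hs := (PySem.List.index?_isSome_iff xs a).mpr h
  obtain ⟨k, hk⟩ := Option.isSome_iff_exists.mp hs
  obtain ⟨hlt, -, -⟩ := PySem.List.getElem_of_index?_eq_some hk
  rw [PySem.List.index?] at hk
  simpa [hk] using hlt

theorem pv_pairwise_index_ofList (xs : List Int) :
    (PySem.Set.ofList xs).Pairwise
      (fun a b => ((PySem.List.index? xs a).getD 0 : Nat) < (PySem.List.index? xs b).getD 0) := by
  induction xs using List.reverseRecOn with
  | nil => simp [PySem.Set.ofList, PySem.Set.empty]
  | append_singleton xs y ih =>
    rw [pv_ofList_append_singleton]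
    by_cases hy : y ∈ PySem.Set.ofList xs
    · rw [PySem.Set.add_of_mem hy]
      refine ih.imp_of_mem (fun {a b} ha hb hab => ?_)
      rwa [PySem.List.index?_append_of_mem _ ((PySem.Set.mem_ofList xs a).mp ha),
        PySem.List.index?_append_of_mem _ ((PySem.Set.mem_ofList xs b).mp hb)]
    · rw [PySem.Set.add_of_not_mem hy]
      have hy' : y ∉ xs := fun h => hy ((PySem.Set.mem_ofList xs y).mpr h)
      rw [List.pairwise_append]
      refine ⟨ih.imp_of_mem (fun {a b} ha hb hab => ?_), by simp, fun a ha b hb => ?_⟩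
      · rwa [PySem.List.index?_append_of_mem _ ((PySem.Set.mem_ofList xs a).mp ha),
          PySem.List.index?_append_of_mem _ ((PySem.Set.mem_ofList xs b).mp hb)]
      · have hb' : b = y := by simpa using hb
        subst hb'
        have ha' : a ∈ xs := (PySem.Set.mem_ofList xs a).mp ha
        rw [PySem.List.index?_append_of_mem _ ha',
          PySem.List.index?_append_singleton_self xs _ hy']
        simpa using pv_idx_lt_length ha'

theorem pv_ofList_filter (p : Int → Bool) (xs : List Int) :
    PySem.Set.ofList (xs.filter p) = (PySem.Set.ofList xs).filter p := by
  induction xs using List.reverseRecOn with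
  | nil => simp [PySem.Set.ofList, PySem.Set.empty]
  | append_singleton xs y ih =>
    rw [List.filter_append, pv_ofList_append_singleton]
    by_cases hy : y ∈ PySem.Set.ofList xs
    · have hy' : y ∈ xs := (PySem.Set.mem_ofList xs y).mp hy
      rw [PySem.Set.add_of_mem hy]
      by_cases hp : p y
      · have : y ∈ PySem.Set.ofList (xs.filter p) := by
          rw [PySem.Set.mem_ofList]; exact List.mem_filter.mpr ⟨hy', hp⟩
        rw [show List.filter p [y] = [y] by simp [hp], pv_ofList_append_singleton,
          PySem.Set.add_of_mem this, ih]
      · rw [show List.filter p [y] = [] by simp [hp], List.append_nil, ih]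
    · have hy' : y ∉ xs := fun h => hy ((PySem.Set.mem_ofList xs y).mpr h)
      rw [PySem.Set.add_of_not_mem hy, List.filter_append]
      by_cases hp : p y
      · have : y ∉ PySem.Set.ofList (xs.filter p) := by
          rw [PySem.Set.mem_ofList]; exact fun h => hy' (List.mem_filter.mp h).1
        rw [show List.filter p [y] = [y] by simp [hp], pv_ofList_append_singleton,
          PySem.Set.add_of_not_mem this, ih]
      · rw [show List.filter p [y] = [] by simp [hp], List.append_nil, List.append_nil, ih]

theorem pv_ofList_cons (x : Int) : ∀ t : List Int,
    PySem.Set.ofList (x :: t) = x :: (PySem.Set.ofList t).filter (fun y => !(y == x)) := by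
  intro t
  induction t using List.reverseRecOn with
  | nil => simp [PySem.Set.ofList, PySem.Set.empty, PySem.Set.add, PySem.Set.contains]
  | append_singleton t y ih =>
    rw [show x :: (t ++ [y]) = (x :: t) ++ [y] from rfl, pv_ofList_append_singleton, ih,
      pv_ofList_append_singleton]
    by_cases hyx : y = x
    · subst hyx
      rw [PySem.Set.add_of_mem (by simp)]
      by_cases hy : y ∈ PySem.Set.ofList t
      · rw [PySem.Set.add_of_mem hy]
      · rw [PySem.Set.add_of_not_mem hy, List.filter_append]
        simp
    · by_cases hy : y ∈ PySem.Set.ofList t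
      · rw [PySem.Set.add_of_mem hy, PySem.Set.add_of_mem
          (by simp [List.mem_filter, hy, hyx])]
      · have hnotin : y ∉ x :: (PySem.Set.ofList t).filter (fun y => !(y == x)) := by
          intro hmem
          rcases List.mem_cons.mp hmem with h | h
          · exact hyx h
          · exact hy (List.mem_filter.mp h).1
        rw [PySem.Set.add_of_not_mem hy, PySem.Set.add_of_not_mem hnotin, List.filter_append]
        simp [hyx]
theorem pv_len_filter_count (x : Int) : ∀ l : List Int,
    l.length = (l.filter (fun y => !(y == x))).length + l.count x := by
  intro l
  induction l with
  | nil => simp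
  | cons a l ih =>
    rw [List.filter_cons, List.count_cons]
    by_cases hax : a = x
    · subst hax; simp; omega
    · have h1 : (!(a == x)) = true := by simpa using hax
      have h2 : (a == x) = false := by simpa using hax
      simp [h2]; omega

theorem pv_groups_eq : ∀ lst : List Int,
    pvGroups lst = (PySem.Set.ofList lst).map (fun a => (a, (lst.count a : Int))) := by
  intro lst
  induction lst using pvGroups.induct with
  | case1 =>
    rw [pvGroups]
    simp [PySem.Set.ofList, PySem.Set.empty]
  | case2 x t nxt ih =>
    rw [pvGroups]
    rw [ih, pv_ofList_cons, List.map_cons]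
    congr 1
    · have hcnt := pv_len_filter_count x (x :: t)
      have heq : ((x :: t).length : Int) - ((nxt : List Int).length : Int) =
          ((x :: t).count x : Int) := by
        simp only [nxt]
        omega
      rw [heq]
    · have hnxt : (nxt : List Int) = t.filter (fun y => !(y == x)) := by
        simp [nxt]
      rw [hnxt, pv_ofList_filter]
      refine List.map_congr_left (fun a ha => ?_)
      have hax : ¬ (a = x) := by
        rcases List.mem_filter.mp ha with ⟨-, hp⟩
        simpa using hp
      have hxa : ¬ (x = a) := fun h => hax h.symm
      have hcount : (t.filter (fun y => !(y == x))).count a = (x :: t).count a := by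
        rw [List.count_filter (by simpa using hax), List.count_cons]
        simp [hxa]
      rw [hcount]
theorem pv_filter_erase (x : Int) : ∀ t : List Int,
    (t.erase x).filter (fun y => !(y == x)) = t.filter (fun y => !(y == x)) := by
  intro t
  induction t with
  | nil => simp
  | cons a t ih =>
    by_cases hax : a = x
    · subst hax; simp [List.erase_cons_head]
    · rw [List.erase_cons_tail (by simpa using hax)]
      simp only [List.filter_cons]
      rw [ih]

theorem pv_removeA_of_mem {t : List Int} {x : Int} (h : x ∈ t) : pvRemoveA t x = t.erase x := by
  unfold pvRemoveA
  rw [PySem.List.remove?_eq_some_erase t x h, Option.getD_some]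

theorem pv_remove3_eq_filter (t : List Int) (x : Int) (h : t.count x = 3) :
    pvRemoveA (pvRemoveA (pvRemoveA t x) x) x = t.filter (fun y => !(y == x)) := by
  have h1 : x ∈ t := List.count_pos_iff.mp (by omega)
  have hc1 : (t.erase x).count x = 2 := by rw [List.count_erase_self, h]
  have h2 : x ∈ t.erase x := List.count_pos_iff.mp (by omega)
  have hc2 : ((t.erase x).erase x).count x = 1 := by rw [List.count_erase_self, hc1]
  have h3 : x ∈ (t.erase x).erase x := List.count_pos_iff.mp (by omega)
  have hc3 : (((t.erase x).erase x).erase x).count x = 0 := by rw [List.count_erase_self, hc2]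
  have hnot : x ∉ ((t.erase x).erase x).erase x := by
    intro hmem; have := List.count_pos_iff.mpr hmem; omega
  rw [pv_removeA_of_mem h1, pv_removeA_of_mem h2, pv_removeA_of_mem h3,
    ← pv_filter_erase x t, ← pv_filter_erase x (t.erase x),
    ← pv_filter_erase x ((t.erase x).erase x)]
  symm
  rw [List.filter_eq_self]
  intro a ha
  have : a ≠ x := fun he => hnot (he ▸ ha)
  simp [this]

theorem pv_removeFold_eq_filter : ∀ (chosen t : List Int), chosen.Nodup →
    (∀ c ∈ chosen, t.count c = 3) →
    (chosen.flatMap (fun c => [c, c, c])).foldl pvRemoveA t =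
      t.filter (fun y => !(chosen.contains y)) := by
  intro chosen
  induction chosen with
  | nil => intro t _ _; simp
  | cons c cs ih =>
    intro t hnd hcnt
    rw [List.flatMap_cons, List.foldl_append]
    have hstep : List.foldl pvRemoveA t [c, c, c] =
        t.filter (fun y => !(y == c)) := by
      simpa [List.foldl] using pv_remove3_eq_filter t c (hcnt c (by simp))
    rw [hstep, ih _ hnd.of_cons ?hc]
    case hc =>
      intro d hd
      have hdc : d ≠ c := fun he => (List.nodup_cons.mp hnd).1 (he ▸ hd)
      rw [List.count_filter (by simpa using hdc), hcnt d (List.mem_cons_of_mem _ hd)]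
    rw [List.filter_filter]
    refine List.filter_congr (fun a _ => ?_)
    by_cases hac : a = c <;> simp [hac]

theorem pv_slice_to_take (xs : List Int) (b : Int) :
    PySem.List.slice xs none (some b) = xs.take (PySem.List.clampIdx xs.length b) := by
  simp [PySem.List.slice]

theorem pv_clampIdx_mul3 (n : Nat) (l : Int) :
    PySem.List.clampIdx (3 * n) (3 * l) = 3 * PySem.List.clampIdx n l := by
  unfold PySem.List.clampIdx
  split_ifs <;> omega

theorem pv_take_mul3_flatMap : ∀ (k : Nat) (ts : List Int),
    (ts.flatMap (fun t => [t, t, t])).take (3 * k) =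
      (ts.take k).flatMap (fun t => [t, t, t]) := by
  intro k
  induction k with
  | zero => intro ts; simp
  | succ k ih =>
    intro ts
    cases ts with
    | nil => simp
    | cons t ts =>
      rw [List.flatMap_cons, List.take_succ_cons, List.flatMap_cons,
        show 3 * (k + 1) = ((3 * k + 1) + 1) + 1 by ring]
      simp only [List.cons_append, List.nil_append, List.take_succ_cons]
      rw [ih]

theorem pv_length_flatMap_triple (ts : List Int) :
    (ts.flatMap (fun t => [t, t, t])).length = 3 * ts.length := by
  induction ts with
  | nil => simp
  | cons t ts ih => simp [ih]; ring

theorem pv_slice_flatMap_triple (ts : List Int) (l : Int) :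
    PySem.List.slice (ts.flatMap (fun t => [t, t, t])) none (some (3 * l)) =
      (PySem.List.slice ts none (some l)).flatMap (fun t => [t, t, t]) := by
  rw [pv_slice_to_take, pv_slice_to_take, pv_length_flatMap_triple,
    pv_clampIdx_mul3, pv_take_mul3_flatMap]

theorem pv_foldl_triple (l acc : List Int) :
    l.foldl (fun acc t => acc ++ [t, t, t]) acc = acc ++ l.flatMap (fun t => [t, t, t]) := by
  induction l generalizing acc with
  | nil => simp
  | cons a l ih => rw [List.foldl_cons, ih, List.flatMap_cons, List.append_assoc]

theorem pv_loopA_pad (chosen temp2 : List Int) (cnt : Int → Nat) :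
    ∀ (D out : List Int) (length : Int),
    (∀ x ∈ D, x ∉ chosen → temp2.count x = cnt x) →
    (pvLoopA (D.filter (fun y => !(chosen.contains y))) temp2 out length).getD [] =
      pvPad (D.map (fun k => (k, (cnt k : Int)))) chosen out length := by
  intro D
  induction D with
  | nil => intro out length _; simp [pvLoopA, pvPad]
  | cons d D ih =>
    intro out length hc
    have ihD := fun out => ih out length (fun x hx => hc x (List.mem_cons_of_mem _ hx))
    by_cases hd : d ∈ chosen
    · rw [List.filter_cons_of_neg (by simpa using hd), List.map_cons]
      conv_rhs => rw [pvPad]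
      have hcontains : chosen.contains d = true := by
        simpa [List.contains_iff_mem] using hd
      rw [if_pos hcontains]
      exact ihD out
    · rw [List.filter_cons_of_pos (by simpa using hd), List.map_cons]
      conv_lhs => rw [pvLoopA]
      conv_rhs => rw [pvPad]
      have hcontains : ¬ (chosen.contains d = true) := by
        simpa [List.contains_iff_mem] using hd
      rw [if_neg hcontains]
      have hout : (if 2 ≤ PySem.List.count temp2 d then out ++ [d, d] else out) =
          (if (2:Int) ≤ (cnt d : Int) then out ++ [d, d] else out) := by
        have hcnt' : PySem.List.count temp2 d = cnt d := hc d (by simp) hd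
        rw [hcnt']
        by_cases hq : 2 ≤ cnt d
        · rw [if_pos hq, if_pos (by exact_mod_cast hq)]
        · rw [if_neg hq, if_neg (by exact_mod_cast hq)]
      rw [hout]
      by_cases hlen :
          (((if (2:Int) ≤ (cnt d : Int) then out ++ [d, d] else out).length : Int) = length)
      · rw [if_pos hlen, if_pos hlen, Option.getD_some]
      · rw [if_neg hlen, if_neg hlen]; exact ihD _
theorem pv_sorted_index_ofList (xs : List Int) :
    PySem.List.sorted (PySem.Set.ofList xs) (fun x => ((PySem.List.index? xs x).getD 0 : Nat)) =
      PySem.Set.ofList xs :=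
  PySem.List.sorted_eq_of_perm_of_pairwise_lt _ _ _ (List.Perm.refl _)
    (pv_pairwise_index_ofList xs)

theorem pv_foldl_if_triple (p : Int → Prop) [DecidablePred p] :
    ∀ (l acc : List Int),
    l.foldl (fun acc item => if p item then acc ++ [item, item, item] else acc) acc =
      acc ++ (l.filter (fun x => decide (p x))).flatMap (fun t => [t, t, t]) := by
  intro l
  induction l with
  | nil => intro acc; simp
  | cons a l ih =>
    intro acc
    rw [List.foldl_cons, List.filter_cons]
    by_cases ha : p a
    · rw [if_pos ha, if_pos (by exact decide_eq_true ha), ih, List.flatMap_cons,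
        List.append_assoc]
    · rw [if_neg ha, if_neg (by exact (by simpa using ha : ¬ (decide (p a) = true))), ih]

theorem pv_natBeq_intBeq (n : Nat) : (((n : Int)) == (3:Int)) = (decide (n = 3)) := by
  by_cases h : n = 3
  · simp [h]
  · rw [decide_eq_false h, beq_eq_false_iff_ne]
    exact_mod_cast h

theorem pv_spec (alist : List Int) (length : Int) :
    liansantong2inmyHand alist length = liansantong2inmyHand_alt alist length := by
  unfold liansantong2inmyHand liansantong2inmyHand_alt
  dsimp only
  rw [pv_groups_eq, List.filter_map, List.map_map]
  simp only [Function.comp_def]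
  rw [pv_sorted_index_ofList alist,
    pv_foldl_if_triple (fun item => PySem.List.count alist item = 3) (PySem.Set.ofList alist) []]
  simp only [List.nil_append]
  rw [show (fun x : Int => ((List.count x alist : Int) == 3)) =
      (fun x : Int => decide (PySem.List.count alist x = 3)) from
    funext fun x => pv_natBeq_intBeq (List.count x alist)]
  simp only [List.map_id']
  set T := (PySem.Set.ofList alist).filter
      (fun x : Int => decide (PySem.List.count alist x = 3)) with hT
  rw [pv_length_flatMap_triple]
  by_cases hc : (T.length : Int) < PySem.Int.floordiv length 5
  · rw [if_pos (by push_cast; omega), if_pos hc]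
  · rw [if_neg (by push_cast; omega), if_neg hc]
    rw [pv_slice_flatMap_triple T (PySem.Int.floordiv length 5)]
    set chosen := PySem.List.slice T none (some (PySem.Int.floordiv length 5)) with hchosen
    rw [pv_foldl_triple chosen [], List.nil_append]
    rw [show List.foldl (fun acc item => acc ++ [item]) ([] : List Int) alist = alist from
      by simpa using PySem.List.foldl_append_singleton alist []]
    have hsubT : chosen.Sublist T := by
      rw [hchosen, pv_slice_to_take]; exact List.take_sublist _ _
    have hnodup : chosen.Nodup :=
      hsubT.nodup (List.Sublist.nodup (List.filter_sublist) (PySem.Set.nodup_ofList alist))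
    have hcnt3 : ∀ c ∈ chosen, alist.count c = 3 := by
      intro c hcmem
      have : c ∈ T := hsubT.mem hcmem
      rw [hT, List.mem_filter] at this
      simpa [PySem.List.count] using of_decide_eq_true this.2
    rw [pv_removeFold_eq_filter chosen alist hnodup hcnt3,
      pv_sorted_index_ofList (alist.filter (fun y => !(chosen.contains y))),
      pv_ofList_filter (fun y => !(chosen.contains y)) alist]
    refine pv_loopA_pad chosen (alist.filter (fun y => !(chosen.contains y)))
      (fun x => List.count x alist) (PySem.Set.ofList alist) _ length ?_
    intro x _ hxc
    exact List.count_filter (by simpa using hxc)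

-- ===== VERDICT (by name: the statement is the Claim_ definition above) =====
theorem liansantong2inmyHand_spec : Claim_equal_liansantong2inmyHand := by
  intro alist length _
  unfold Spec_liansantong2inmyHand
  exact pv_spec alist length
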